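-- pv_equiv track=rewrite | github.com/marcoscarpetta/old-code | Python/flat-flask-blog/blog_backend.py | pretty_title
-- ===== SOURCE A (Python) =====
-- import unicodedata
--
-- def pretty_title(title: str, words_number: int=5) -> str:
--     title = unicodedata.normalize('NFKD', title)
--     title = title.lower()
--     allowed = "abcdefghijklmnopqrstuvwxyz0123456789 "
--     title = "".join(l for l in title if l in allowed)
--
--     words = [word for word in title.split(" ") if word != ""]
--
--     if len(words) == 0:
--         return "untitled"
--
--     pretty_title = ""
--     for word in words:
--         pretty_title += word + "-"
--
--     return pretty_title[:-1]
-- ===== SOURCE B (Python) =====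
-- import unicodedata
--
-- def pretty_title(title: str, words_number: int = 5) -> str:
--     s = unicodedata.normalize('NFKD', title).lower()
--     words = []
--     buf = ""
--     for c in s:
--         if c == ' ':
--             if buf:
--                 words.append(buf)
--                 buf = ""
--         elif 'a' <= c <= 'z' or '0' <= c <= '9':
--             buf += c
--         # any other character is silently dropped (neighbours merge, as in A)
--     if buf:
--         words.append(buf)
--     if not words:
--         return "untitled"
--     return "-".join(words)
-- ===== Notes on version B (the rewrite author's own statement) =====
-- stated objective: alternative
-- what changed: Replaced A's four separate passes (filter to allowed chars, split on space, drop empty words, rebuild with a trailing hyphen then strip it) by a single-pass character state machine that builds the word list directly with a current-word buffer and finishes with a hyphen join.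
import Mathlib
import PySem

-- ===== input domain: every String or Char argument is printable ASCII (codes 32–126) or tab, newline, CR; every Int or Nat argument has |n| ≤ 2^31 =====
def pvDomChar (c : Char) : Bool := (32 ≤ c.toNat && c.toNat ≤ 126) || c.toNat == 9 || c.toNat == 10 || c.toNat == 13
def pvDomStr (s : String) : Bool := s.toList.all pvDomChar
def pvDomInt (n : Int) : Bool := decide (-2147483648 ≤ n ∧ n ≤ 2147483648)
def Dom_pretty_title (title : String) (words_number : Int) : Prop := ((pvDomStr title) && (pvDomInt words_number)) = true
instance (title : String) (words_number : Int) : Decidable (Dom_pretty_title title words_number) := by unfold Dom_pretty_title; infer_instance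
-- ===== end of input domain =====

-- B fuses A's separate passes (filter allowed chars, split on space, drop empties, rebuild with
-- trailing hyphen and strip it) into one character state machine building the word list directly;
-- objective: alternative decomposition, same cost.

-- ===== PORT A =====
-- unicodedata.normalize('NFKD', ·) is the identity on the ASCII domain (Dom); ported as identity.
-- 'l in allowed' for the single char l is membership in the allowed string, ported as contains.
def pretty_title (title : String) (words_number : Int) : String :=
  let t := PySem.Chars.lower title.toList
  let allowed : List Char := "abcdefghijklmnopqrstuvwxyz0123456789 ".toList
  let t2 := t.filter (fun l => allowed.contains l)
  let words := (PySem.Chars.splitOn t2 [' ']).filter (fun w => decide (w ≠ []))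
  if words.length = 0 then "untitled"
  else
    let pt := words.foldl (fun acc w => acc ++ w ++ ['-']) ([] : List Char)
    String.mk (PySem.Chars.slice pt none (some (-1)))

-- ===== PORT B =====
def pvFlush (buf : List Char) (words : List (List Char)) : List (List Char) :=
  if buf = [] then words else words ++ [buf]

def pvScan : List Char → List Char → List (List Char) → List (List Char)
  | [], buf, words => pvFlush buf words
  | c :: rest, buf, words =>
    if c = ' ' then pvScan rest [] (pvFlush buf words)
    else if ('a' ≤ c ∧ c ≤ 'z') ∨ ('0' ≤ c ∧ c ≤ '9') then pvScan rest (buf ++ [c]) words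
    else pvScan rest buf words

def pretty_title_alt (title : String) (words_number : Int) : String :=
  let words := pvScan (PySem.Chars.lower title.toList) [] []
  if words = [] then "untitled"
  else String.mk (PySem.Chars.join ['-'] words)

-- ===== PRECONDITION & SPEC =====
def Spec_pretty_title (title : String) (words_number : Int) (out : String) : Prop := out = pretty_title_alt title words_number
instance (title : String) (words_number : Int) (out : String) : Decidable (Spec_pretty_title title words_number out) := by unfold Spec_pretty_title; infer_instance

-- ===== CLAIM (what is proved, stated in full; the proofs are below) =====
def Claim_equal_pretty_title : Prop := ∀ (title : String) (words_number : Int), Dom_pretty_title title words_number → Spec_pretty_title title words_number (pretty_title title words_number)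

-- ===== LEMMAS AND PROOFS =====

-- simple spec of Python's s.split(" ") used as the meeting point of the two ports
def splitSp : List Char → List Char → List (List Char)
  | [], cur => [cur.reverse]
  | c :: rest, cur => if c = ' ' then cur.reverse :: splitSp rest [] else splitSp rest (c :: cur)

theorem splitOn_go_eq (l : List Char) : ∀ (fuel : Nat) (cur : List Char) (acc : List (List Char)),
    l.length + 1 ≤ fuel →
    PySem.Chars.splitOn.go [' '] fuel l cur acc = acc.reverse ++ splitSp l cur := by
  induction l with
  | nil =>
    intro fuel cur acc h
    obtain ⟨f, rfl⟩ : ∃ f, fuel = f + 1 := ⟨fuel - 1, by omega⟩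
    simp [PySem.Chars.splitOn.go, splitSp]
  | cons c rest ih =>
    intro fuel cur acc h
    obtain ⟨f, rfl⟩ : ∃ f, fuel = f + 1 := ⟨fuel - 1, by omega⟩
    by_cases hc : c = ' '
    · subst hc
      have hpre : ([' '].isPrefixOf (' ' :: rest)) = true := by simp [List.isPrefixOf]
      simp only [PySem.Chars.splitOn.go, hpre, if_true, List.length_cons, List.drop_succ_cons,
        List.length_nil, List.drop_zero]
      rw [ih f [] (cur.reverse :: acc) (by simp at h ⊢; omega)]
      simp [splitSp]
    · have hpre : ([' '].isPrefixOf (c :: rest)) = false := by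
        simp [List.isPrefixOf]
        exact fun hh => absurd hh.symm hc
      simp only [PySem.Chars.splitOn.go, hpre, Bool.false_eq_true, if_false]
      rw [ih f (c :: cur) acc (by simp at h ⊢; omega)]
      simp [splitSp, hc]

theorem splitOn_eq_splitSp (l : List Char) :
    PySem.Chars.splitOn l [' '] = splitSp l [] := by
  rw [PySem.Chars.splitOn, splitOn_go_eq l (l.length + 1) [] [] (le_refl _)]
  rfl

theorem char_eq_iff_toNat (c d : Char) : c = d ↔ c.toNat = d.toNat := by
  constructor
  · rintro rfl; rfl
  · intro h
    have hc := Char.ofNat_toNat c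
    have hd := Char.ofNat_toNat d
    rw [← hc, ← hd, h]

theorem char_le_iff_toNat (c d : Char) : c ≤ d ↔ c.toNat ≤ d.toNat := by
  rw [Char.le_def]
  exact UInt32.le_iff_toNat_le

-- A's membership test in the allowed string agrees with B's range tests (space separated out)
theorem allowed_iff (c : Char) :
    ("abcdefghijklmnopqrstuvwxyz0123456789 ".toList.contains c = true) ↔
    (c = ' ' ∨ ('a' ≤ c ∧ c ≤ 'z') ∨ ('0' ≤ c ∧ c ≤ '9')) := by
  rw [show ("abcdefghijklmnopqrstuvwxyz0123456789 ".toList) =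
    ['a','b','c','d','e','f','g','h','i','j','k','l','m','n','o','p','q','r','s','t','u','v','w','x','y','z','0','1','2','3','4','5','6','7','8','9',' '] from rfl]
  simp only [List.contains_eq_mem, List.mem_cons, List.not_mem_nil, or_false, decide_eq_true_eq]
  simp only [char_eq_iff_toNat, char_le_iff_toNat]
  constructor
  · intro h
    rcases h with h|h|h|h|h|h|h|h|h|h|h|h|h|h|h|h|h|h|h|h|h|h|h|h|h|h|h|h|h|h|h|h|h|h|h|h|h <;>
      simp [h]
  · intro h
    rcases h with h | ⟨h1, h2⟩ | ⟨h1, h2⟩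
    · omega
    · revert h1 h2; show 97 ≤ c.toNat → c.toNat ≤ 122 → _
      intro h1 h2; interval_cases (c.toNat) <;> simp
    · revert h1 h2; show 48 ≤ c.toNat → c.toNat ≤ 57 → _
      intro h1 h2; interval_cases (c.toNat) <;> simp

-- B's single pass computes A's filtered-split-filtered word list
theorem scan_eq (cs : List Char) : ∀ (buf : List Char) (words : List (List Char)),
    ' ' ∉ buf →
    pvScan cs buf words =
      words ++ (splitSp (cs.filter (fun c => "abcdefghijklmnopqrstuvwxyz0123456789 ".toList.contains c)) buf.reverse).filter
        (fun w => decide (w ≠ [])) := by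
  induction cs with
  | nil =>
    intro buf words _
    by_cases hb : buf = []
    · simp [pvScan, pvFlush, hb, splitSp]
    · simp [pvScan, pvFlush, hb, splitSp]
  | cons c rest ih =>
    intro buf words hbuf
    by_cases hc : c = ' '
    · subst hc
      have hcon : ("abcdefghijklmnopqrstuvwxyz0123456789 ".toList.contains ' ') = true := by decide
      simp only [pvScan, if_true, List.filter_cons, hcon, if_pos]
      rw [ih [] (pvFlush buf words) (by simp)]
      simp only [splitSp, List.reverse_reverse, List.reverse_nil, List.filter_cons]
      by_cases hb : buf = []
      · simp [pvFlush, hb]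
      · simp [pvFlush, hb]
    · by_cases hr : ('a' ≤ c ∧ c ≤ 'z') ∨ ('0' ≤ c ∧ c ≤ '9')
      · have hcon : ("abcdefghijklmnopqrstuvwxyz0123456789 ".toList.contains c) = true :=
          (allowed_iff c).mpr (Or.inr hr)
        simp only [pvScan, hc, if_false, hr, if_true, List.filter_cons, hcon, if_pos]
        rw [ih (buf ++ [c]) words (by simp [hbuf]; exact fun h => hc h.symm)]
        simp [splitSp, hc, List.reverse_append]
      · have hcon : ("abcdefghijklmnopqrstuvwxyz0123456789 ".toList.contains c) = false := by
          rw [Bool.eq_false_iff]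
          intro h
          rcases (allowed_iff c).mp h with h' | h'
          · exact hc h'
          · exact hr h'
        simp only [pvScan, hc, if_false, hr, List.filter_cons, hcon]
        exact ih buf words hbuf

-- A's fold-then-strip equals '-'.join on a nonempty word list
theorem flatMap_hyphen_ne_nil (w : List Char) (ws : List (List Char)) :
    (w :: ws).flatMap (fun x => x ++ ['-']) ≠ [] := by
  simp [List.flatMap_cons]

theorem dropLast_flatMap_eq_join (w : List Char) (ws : List (List Char)) :
    ((w :: ws).flatMap (fun x => x ++ ['-'])).dropLast = PySem.Chars.join ['-'] (w :: ws) := by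
  induction ws generalizing w with
  | nil =>
    simp [List.flatMap_cons, PySem.Chars.join_singleton]
  | cons w2 rest ih =>
    rw [List.flatMap_cons, PySem.Chars.join_cons_cons]
    rw [show w ++ ['-'] ++ (w2 :: rest).flatMap (fun x => x ++ ['-']) =
      (w ++ ['-']) ++ (w2 :: rest).flatMap (fun x => x ++ ['-']) by simp]
    rw [List.dropLast_append_of_ne_nil (flatMap_hyphen_ne_nil w2 rest)]
    rw [ih w2]

theorem foldl_hyphen (words : List (List Char)) :
    words.foldl (fun acc w => acc ++ w ++ ['-']) ([] : List Char) =
      words.flatMap (fun x => x ++ ['-']) := by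
  have : ∀ (init : List Char), words.foldl (fun acc w => acc ++ w ++ ['-']) init =
      init ++ words.flatMap (fun x => x ++ ['-']) := by
    induction words with
    | nil => intro init; simp
    | cons w ws ih =>
      intro init
      rw [List.foldl_cons, ih, List.flatMap_cons]
      simp
  simpa using this []

-- ===== VERDICT (by name: the statement is the Claim_ definition above) =====
theorem pretty_title_spec : Claim_equal_pretty_title := by
  intro title words_number _
  unfold Spec_pretty_title pretty_title pretty_title_alt
  rw [scan_eq (PySem.Chars.lower title.toList) [] [] (by simp)]
  simp only [List.reverse_nil, List.nil_append]
  rw [splitOn_eq_splitSp]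
  set words := (splitSp ((PySem.Chars.lower title.toList).filter
    (fun c => "abcdefghijklmnopqrstuvwxyz0123456789 ".toList.contains c)) []).filter
      (fun w => decide (w ≠ [])) with hw
  by_cases h : words = []
  · simp [h]
  · rw [if_neg (by simpa using h), if_neg h]
    obtain ⟨w, ws, heq⟩ := List.exists_cons_of_ne_nil h
    rw [heq, foldl_hyphen, PySem.Chars.slice_eq_listSlice, PySem.List.slice_to_neg_one,
      dropLast_flatMap_eq_join]
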